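-- pv_equiv track=rewrite | github.com/lkubicki/python | tram-trasa.py | podaj_zakres_trasy
-- ===== SOURCE A (Python) =====
-- def podaj_zakres_trasy(przystanki, trasa):
--     pierwszy = 0
--     ostatni = 0
--     for i in range(len(przystanki)):
--         if przystanki[pierwszy] in trasa:
--             pierwszy = pierwszy + 1
--         if przystanki[i] not in trasa:
--             ostatni = i
--     return pierwszy, ostatni
-- ===== SOURCE B (Python) =====
-- def podaj_zakres_trasy(przystanki, trasa):
--     na_trasie = set(trasa)
--     pierwszy = 0
--     while pierwszy < len(przystanki) and przystanki[pierwszy] in na_trasie: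
--         pierwszy += 1
--     for i in range(len(przystanki) - 1, -1, -1):
--         if przystanki[i] not in na_trasie:
--             return pierwszy, i
--     return pierwszy, 0
-- ===== Notes on version B (the rewrite author's own statement) =====
-- stated objective: simpler
-- what changed: Replaces A's fused loop with self-referential pierwszy-indexing by two independent scans: an early-terminating forward prefix scan for pierwszy and a backward scan with an early return for ostatni, both against a set built from trasa.
import Mathlib
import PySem

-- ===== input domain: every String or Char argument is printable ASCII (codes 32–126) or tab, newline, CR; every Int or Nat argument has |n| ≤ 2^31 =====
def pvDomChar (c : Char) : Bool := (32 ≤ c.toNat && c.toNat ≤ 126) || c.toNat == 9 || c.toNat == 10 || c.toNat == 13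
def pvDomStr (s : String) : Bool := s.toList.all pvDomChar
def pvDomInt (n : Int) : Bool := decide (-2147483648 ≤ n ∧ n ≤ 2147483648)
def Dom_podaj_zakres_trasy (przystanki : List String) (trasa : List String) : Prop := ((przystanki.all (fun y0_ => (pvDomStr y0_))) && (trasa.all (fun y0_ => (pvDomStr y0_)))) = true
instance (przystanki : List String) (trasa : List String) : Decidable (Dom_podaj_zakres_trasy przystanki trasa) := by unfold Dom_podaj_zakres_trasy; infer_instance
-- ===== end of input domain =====

-- B replaces A's fused loop (with its self-referential pierwszy index) by two independent
-- scans: a forward early-stopping prefix scan for pierwszy and a backward early-return scan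
-- for ostatni, against a set built from trasa; objective: simpler. Return value only; no mutation.

-- ===== PORT A =====
-- both indexings przystanki[pierwszy] and przystanki[i] are always in range
-- (pierwszy ≤ i < len throughout), so pyGetD with a dummy default is exact
def podaj_zakres_trasy (przystanki : List String) (trasa : List String) : Int × Int :=
  (PySem.List.pyRange 0 (PySem.List.len przystanki) 1).foldl
    (fun (st : Int × Int) i =>
      (if trasa.contains (PySem.List.pyGetD przystanki st.1 "") then st.1 + 1 else st.1,
       if !(trasa.contains (PySem.List.pyGetD przystanki i "")) then i else st.2))
    (0, 0)

-- ===== PORT B =====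
-- 'while pierwszy < len(przystanki) and przystanki[pierwszy] in na_trasie: pierwszy += 1'
-- as the obvious structural recursion over the list being indexed
def pvBPrefix (na : PySem.Set String) : List String → Int
  | [] => 0
  | s :: rest => if PySem.Set.contains na s then 1 + pvBPrefix na rest else 0

-- the backward 'for i in range(len-1, -1, -1): if … not in na_trasie: return pierwszy, i'
-- with its early return, as recursion over the descending index list
def pvBLast (przystanki : List String) (na : PySem.Set String) : List Int → Int
  | [] => 0
  | i :: rest =>
      if !(PySem.Set.contains na (PySem.List.pyGetD przystanki i "")) then i
      else pvBLast przystanki na rest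

def podaj_zakres_trasy_alt (przystanki : List String) (trasa : List String) : Int × Int :=
  let na := PySem.Set.ofList trasa
  (pvBPrefix na przystanki,
   pvBLast przystanki na (PySem.List.pyRange (PySem.List.len przystanki - 1) (-1) (-1)))

-- ===== PRECONDITION & SPEC =====
def Spec_podaj_zakres_trasy (przystanki : List String) (trasa : List String) (out : Int × Int) : Prop := out = podaj_zakres_trasy_alt przystanki trasa
instance (przystanki : List String) (trasa : List String) (out : Int × Int) : Decidable (Spec_podaj_zakres_trasy przystanki trasa out) := by unfold Spec_podaj_zakres_trasy; infer_instance

-- ===== CLAIM (what is proved, stated in full; the proofs are below) =====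
def Claim_equal_podaj_zakres_trasy : Prop := ∀ (przystanki : List String) (trasa : List String), Dom_podaj_zakres_trasy przystanki trasa → Spec_podaj_zakres_trasy przystanki trasa (podaj_zakres_trasy przystanki trasa)

-- ===== LEMMAS AND PROOFS =====

lemma pv_set_contains_eq (trasa : List String) (x : String) :
    PySem.Set.contains (PySem.Set.ofList trasa) x = trasa.contains x := by
  simp [PySem.Set.contains, PySem.Set.mem_ofList]

-- characterisation of B's prefix scan: its value is a Nat bn ≤ len, every element
-- before index bn is in the set, and the element at bn (if any) is not
lemma pvBPrefix_spec (na : PySem.Set String) (l : List String) :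
    ∃ bn : Nat, pvBPrefix na l = (bn : Int) ∧ bn ≤ l.length ∧
      (∀ k : Nat, k < bn → PySem.Set.contains na (l.getD k "") = true) ∧
      (bn < l.length → PySem.Set.contains na (l.getD bn "") = false) := by
  induction l with
  | nil => exact ⟨0, by simp [pvBPrefix], by simp, by omega, by simp⟩
  | cons s rest ih =>
    obtain ⟨bn, h1, h2, h3, h4⟩ := ih
    by_cases hs : PySem.Set.contains na s = true
    · have hs' : s ∈ na := by simpa using hs
      refine ⟨bn + 1, ?_, by simpa using Nat.succ_le_succ h2, ?_, ?_⟩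
      · simp [pvBPrefix, hs', h1]; ring
      · intro k hk
        cases k with
        | zero => simpa using hs
        | succ k => simpa using h3 k (by omega)
      · intro hlt
        simpa using h4 (by simpa using Nat.lt_of_succ_lt_succ hlt)
    · have hs' : s ∉ na := by simpa using hs
      refine ⟨0, by simp [pvBPrefix, hs'], by omega, by omega, ?_⟩
      intro _
      simpa using hs'

-- A's pierwszy accumulator over range(n) equals min bn n, given pvBPrefix_spec's facts
lemma pv_fold_pierwszy (przystanki trasa : List String) (bn : Nat)
    (hbl : bn ≤ przystanki.length)
    (h3 : ∀ k : Nat, k < bn → trasa.contains (przystanki.getD k "") = true)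
    (h4 : bn < przystanki.length → trasa.contains (przystanki.getD bn "") = false) :
    ∀ n : Nat, n ≤ przystanki.length →
      (PySem.List.pyRange 0 (n : Int) 1).foldl
        (fun p _ => if trasa.contains (PySem.List.pyGetD przystanki p "") then p + 1 else p) 0
      = ((min bn n : Nat) : Int) := by
  intro n
  induction n with
  | zero => simp [PySem.List.pyRange_one_eq_nil]
  | succ m ih =>
    intro hm
    have hm' : m ≤ przystanki.length := by omega
    have hsplit : ((m + 1 : Nat) : Int) = (m : Int) + 1 := by push_cast; ring
    rw [hsplit, PySem.List.pyRange_one_succ_right (by positivity), List.foldl_append,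
        ih hm']
    simp only [List.foldl_cons, List.foldl_nil, PySem.List.pyGetD_natCast]
    by_cases hlt : m < bn
    · rw [h3 (min bn m) (by omega)]
      simp only [if_true]
      have : min bn (m + 1) = m + 1 := by omega
      rw [this]
      have : min bn m = m := by omega
      rw [this]
      push_cast; ring
    · have hmin : min bn m = bn := by omega
      have hbn : bn < przystanki.length := by omega
      rw [hmin, h4 hbn]
      simp only [Bool.false_eq_true, if_false]
      have : min bn (m + 1) = bn := by omega
      rw [this]

lemma pv_fold_ostatni (przystanki trasa : List String) (na : PySem.Set String)
    (hc : ∀ x, PySem.Set.contains na x = trasa.contains x) :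
    ∀ n : Nat,
      (PySem.List.pyRange 0 (n : Int) 1).foldl
        (fun o i => if !(trasa.contains (PySem.List.pyGetD przystanki i "")) then i else o) 0
      = pvBLast przystanki na (PySem.List.pyRange ((n : Int) - 1) (-1) (-1)) := by
  intro n
  induction n with
  | zero =>
    rw [PySem.List.pyRange_one_eq_nil (by simp), PySem.List.pyRange_neg_one_eq_nil (by simp)]
    rfl
  | succ m ih =>
    have hsplit : ((m + 1 : Nat) : Int) = (m : Int) + 1 := by push_cast; ring
    rw [hsplit, PySem.List.pyRange_one_succ_right (by positivity), List.foldl_append,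
        show (m : Int) + 1 - 1 = (m : Int) by ring,
        PySem.List.pyRange_neg_one_cons (show (-1 : Int) < (m : Nat) by omega)]
    simp only [List.foldl_cons, List.foldl_nil, pvBLast, hc, ih]

-- ===== VERDICT (by name: the statement is the Claim_ definition above) =====
theorem podaj_zakres_trasy_spec : Claim_equal_podaj_zakres_trasy := by
  intro przystanki trasa _
  unfold Spec_podaj_zakres_trasy podaj_zakres_trasy podaj_zakres_trasy_alt
  have hc := pv_set_contains_eq trasa
  obtain ⟨bn, h1, h2, h3, h4⟩ := pvBPrefix_spec (PySem.Set.ofList trasa) przystanki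
  rw [PySem.List.foldl_prod_mk
        (f := fun p (i : Int) =>
          if trasa.contains (PySem.List.pyGetD przystanki p "") then p + 1 else p)
        (g := fun o (i : Int) =>
          if !(trasa.contains (PySem.List.pyGetD przystanki i "")) then i else o)]
  simp only [PySem.List.len_eq]
  have h3' : ∀ k : Nat, k < bn → trasa.contains (przystanki.getD k "") = true :=
    fun k hk => by rw [← hc]; exact h3 k hk
  have h4' : bn < przystanki.length → trasa.contains (przystanki.getD bn "") = false :=
    fun h => by rw [← hc]; exact h4 h
  rw [pv_fold_pierwszy przystanki trasa bn h2 h3' h4' przystanki.length le_rfl,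
      pv_fold_ostatni przystanki trasa (PySem.Set.ofList trasa) hc przystanki.length,
      h1, Nat.min_eq_left h2]
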